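-- pv_equiv track=rewrite | github.com/tanishstha/Footwear_recommendation | app.py | diversify_by_product_line
-- ===== SOURCE A (Python) =====
-- from typing import Optional, List, Dict, Any
--
-- def diversify_by_product_line(records: List[Dict[str, Any]], desired_k: int) -> List[Dict[str, Any]]:
--     used = set()
--     out: List[Dict[str, Any]] = []
--     pool = records.copy()
--     while pool and len(out) < desired_k:
--         pick_idx = None
--         for i, r in enumerate(pool):
--             if r.get("product_line") not in used:
--                 pick_idx = i
--                 break
--         if pick_idx is None:
--             pick_idx = 0
--         chosen = pool.pop(pick_idx)
--         out.append(chosen)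
--         used.add(chosen.get("product_line"))
--     return out
-- ===== SOURCE B (Python) =====
-- def diversify_by_product_line(records, desired_k):
--     seen = set()
--     firsts, rest = [], []
--     for r in records:
--         pl = r.get("product_line")
--         (rest if pl in seen else firsts).append(r)
--         seen.add(pl)
--     return (firsts + rest)[:max(desired_k, 0)]
-- ===== Notes on version B (the rewrite author's own statement) =====
-- stated objective: simpler
-- what changed: Replaces A's pick-and-pop selection loop (re-scanning and re-popping the mutable pool each round, quadratic in the worst case) by a single pass that partitions records into first-occurrence-per-product_line and the rest, returning firsts+rest sliced to max(desired_k,0).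
import Mathlib
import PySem

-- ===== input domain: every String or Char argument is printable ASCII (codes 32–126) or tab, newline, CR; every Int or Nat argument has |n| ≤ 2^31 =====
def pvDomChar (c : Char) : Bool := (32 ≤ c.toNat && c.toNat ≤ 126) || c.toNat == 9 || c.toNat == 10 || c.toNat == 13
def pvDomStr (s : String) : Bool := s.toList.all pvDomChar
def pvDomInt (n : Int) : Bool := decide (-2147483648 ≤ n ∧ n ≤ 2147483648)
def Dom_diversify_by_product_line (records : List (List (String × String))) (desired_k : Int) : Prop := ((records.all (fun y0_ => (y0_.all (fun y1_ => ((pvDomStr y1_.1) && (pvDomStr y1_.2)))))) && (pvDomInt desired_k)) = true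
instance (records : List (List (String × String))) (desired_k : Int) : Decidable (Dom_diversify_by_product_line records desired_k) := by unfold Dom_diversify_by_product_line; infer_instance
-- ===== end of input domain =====

-- B replaces A's pick-and-pop selection loop by one partition pass (first record per product_line, then the rest) sliced to max(desired_k, 0); objective: simpler, return values proved equal on the whole domain.


-- r.get("product_line"): first-match lookup in the association list (Python dict get; None = none)
def pvGetPL (r : List (String × String)) : Option String :=
  (r.find? (fun p => p.1 == "product_line")).map Prod.snd

-- ===== PORT A =====
-- the inner 'for i, r in enumerate(pool): if r.get("product_line") not in used: pick_idx = i; break'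
def pvFindUnseen (used : PySem.Set (Option String)) : List (List (String × String)) → Option Nat
  | [] => none
  | r :: rs =>
    if !(PySem.Set.contains used (pvGetPL r)) then some 0
    else (pvFindUnseen used rs).map (· + 1)

-- the 'while pool and len(out) < desired_k' loop over state (used, out, pool)
def pvLoopA (desired_k : Int) (used : PySem.Set (Option String))
    (out pool : List (List (String × String))) : List (List (String × String)) :=
  if h : pool ≠ [] ∧ (out.length : Int) < desired_k then
    let pick : Nat := (pvFindUnseen used pool).getD 0
    match hp : PySem.List.pop? pool (pick : Int) with
    | some (chosen, pool') =>
        pvLoopA desired_k (PySem.Set.add used (pvGetPL chosen)) (out ++ [chosen]) pool'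
    | none => out   -- unreachable: pick is always a valid index of a nonempty pool
  else out
termination_by pool.length
decreasing_by
  have := PySem.List.length_of_pop?_eq_some _ hp
  simp at this
  omega

def diversify_by_product_line (records : List (List (String × String))) (desired_k : Int) : List (List (String × String)) :=
  pvLoopA desired_k PySem.Set.empty [] records

-- ===== PORT B =====
-- the single 'for r in records' pass appending each record to firsts or rest
def pvPart (seen : PySem.Set (Option String)) (firsts rest : List (List (String × String))) :
    List (List (String × String)) → List (List (String × String)) × List (List (String × String))
  | [] => (firsts, rest)
  | r :: rs =>
    let pl := pvGetPL r
    if PySem.Set.contains seen pl then pvPart (PySem.Set.add seen pl) firsts (rest ++ [r]) rs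
    else pvPart (PySem.Set.add seen pl) (firsts ++ [r]) rest rs

def diversify_by_product_line_alt (records : List (List (String × String))) (desired_k : Int) : List (List (String × String)) :=
  let p := pvPart PySem.Set.empty [] [] records
  -- (firsts + rest)[:max(desired_k, 0)] — a slice with a nonnegative bound is List.take
  (p.1 ++ p.2).take (max desired_k 0).toNat

-- ===== PRECONDITION & SPEC =====
def Spec_diversify_by_product_line (records : List (List (String × String))) (desired_k : Int) (out : List (List (String × String))) : Prop := out = diversify_by_product_line_alt records desired_k
instance (records : List (List (String × String))) (desired_k : Int) (out : List (List (String × String))) : Decidable (Spec_diversify_by_product_line records desired_k out) := by unfold Spec_diversify_by_product_line; infer_instance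

-- ===== CLAIM (what is proved, stated in full; the proofs are below) =====
def Claim_equal_diversify_by_product_line : Prop := ∀ (records : List (List (String × String))) (desired_k : Int), Dom_diversify_by_product_line records desired_k → Spec_diversify_by_product_line records desired_k (diversify_by_product_line records desired_k)

-- ===== LEMMAS AND PROOFS =====

-- accumulator lemma for B's pass
theorem pvPart_acc (xs : List (List (String × String))) :
    ∀ (seen : PySem.Set (Option String)) (f r : List (List (String × String))),
      pvPart seen f r xs = (f ++ (pvPart seen [] [] xs).1, r ++ (pvPart seen [] [] xs).2) := by
  induction xs with
  | nil => intro seen f r; simp [pvPart]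
  | cons x rs ih =>
    intro seen f r
    simp only [pvPart, List.nil_append]
    split_ifs with h
    · rw [ih _ f (r ++ [x]), ih _ [] [x]]
      simp
    · rw [ih _ (f ++ [x]) r, ih _ [x] []]
      simp

-- B's combined output, as a function of the running 'seen' set
def pvDiv (seen : PySem.Set (Option String)) (xs : List (List (String × String))) :
    List (List (String × String)) :=
  (pvPart seen [] [] xs).1 ++ (pvPart seen [] [] xs).2

theorem pvFindUnseen_none (xs : List (List (String × String))) :
    ∀ seen, pvFindUnseen seen xs = none → pvPart seen [] [] xs = ([], xs) := by
  induction xs with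
  | nil => intro seen _; simp [pvPart]
  | cons x rs ih =>
    intro seen h
    simp only [pvFindUnseen] at h
    by_cases hm : pvGetPL x ∈ seen
    · simp [hm, Option.map_eq_none_iff] at h
      have hadd : PySem.Set.add seen (pvGetPL x) = seen := PySem.Set.add_of_mem hm
      have L : pvPart seen [] [] (x :: rs) = pvPart seen [] [x] rs := by
        simp [pvPart, hm, hadd]
      rw [L, pvPart_acc rs seen [] [x], ih seen h]
      simp
    · simp [hm] at h

theorem pvFindUnseen_lt (xs : List (List (String × String))) :
    ∀ seen i, pvFindUnseen seen xs = some i → i < xs.length := by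
  induction xs with
  | nil => intro seen i h; simp [pvFindUnseen] at h
  | cons x rs ih =>
    intro seen i h
    simp only [pvFindUnseen] at h
    by_cases hm : pvGetPL x ∈ seen
    · simp [hm] at h
      obtain ⟨j, hfu, hji⟩ := h
      have := ih seen j hfu
      simp only [List.length_cons]
      omega
    · simp [hm] at h
      simp only [List.length_cons]
      omega

theorem pvFindUnseen_some (xs : List (List (String × String))) :
    ∀ seen i (h : pvFindUnseen seen xs = some i) (hlt : i < xs.length),
      (pvPart seen [] [] xs).1
        = xs[i] :: (pvPart (PySem.Set.add seen (pvGetPL xs[i])) [] [] (xs.eraseIdx i)).1 ∧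
      (pvPart seen [] [] xs).2
        = (pvPart (PySem.Set.add seen (pvGetPL xs[i])) [] [] (xs.eraseIdx i)).2 := by
  induction xs with
  | nil => intro seen i h hlt; simp at hlt
  | cons x rs ih =>
    intro seen i h hlt
    simp only [pvFindUnseen] at h
    by_cases hm : pvGetPL x ∈ seen
    · simp [hm] at h
      obtain ⟨j, hfu, hji⟩ := h
      obtain rfl : i = j + 1 := by omega
      have hjlt : j < rs.length := pvFindUnseen_lt rs seen j hfu
      obtain ⟨h1, h2⟩ := ih seen j hfu hjlt
      have hadd : PySem.Set.add seen (pvGetPL x) = seen := PySem.Set.add_of_mem hm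
      have hmem2 : pvGetPL x ∈ PySem.Set.add seen (pvGetPL rs[j]) := by
        rw [PySem.Set.mem_add]; exact Or.inl hm
      have hadd2 : PySem.Set.add (PySem.Set.add seen (pvGetPL rs[j])) (pvGetPL x)
          = PySem.Set.add seen (pvGetPL rs[j]) := PySem.Set.add_of_mem hmem2
      have L : pvPart seen [] [] (x :: rs)
          = ([] ++ (pvPart seen [] [] rs).1, [x] ++ (pvPart seen [] [] rs).2) := by
        have e : pvPart seen [] [] (x :: rs) = pvPart seen [] [x] rs := by
          simp [pvPart, hm, hadd]
        rw [e, pvPart_acc]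
      have R : pvPart (PySem.Set.add seen (pvGetPL rs[j])) [] [] (x :: rs.eraseIdx j)
          = ([] ++ (pvPart (PySem.Set.add seen (pvGetPL rs[j])) [] [] (rs.eraseIdx j)).1,
             [x] ++ (pvPart (PySem.Set.add seen (pvGetPL rs[j])) [] [] (rs.eraseIdx j)).2) := by
        have e : pvPart (PySem.Set.add seen (pvGetPL rs[j])) [] [] (x :: rs.eraseIdx j)
            = pvPart (PySem.Set.add seen (pvGetPL rs[j])) [] [x] (rs.eraseIdx j) := by
          simp [pvPart, hmem2, hadd2]
        rw [e, pvPart_acc]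
      refine ⟨?_, ?_⟩ <;>
        simp [L, R, h1, h2, List.eraseIdx_cons_succ, List.getElem_cons_succ]
    · simp [hm] at h
      obtain rfl : i = 0 := by omega
      have L : pvPart seen [] [] (x :: rs)
          = ([x] ++ (pvPart (PySem.Set.add seen (pvGetPL x)) [] [] rs).1,
             [] ++ (pvPart (PySem.Set.add seen (pvGetPL x)) [] [] rs).2) := by
        have e : pvPart seen [] [] (x :: rs)
            = pvPart (PySem.Set.add seen (pvGetPL x)) [x] [] rs := by
          simp [pvPart, hm]
        rw [e, pvPart_acc]
      refine ⟨?_, ?_⟩ <;> simp [L]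

theorem pvLoopA_eq (k : Int) :
    ∀ (n : Nat) (pool : List (List (String × String))), pool.length = n →
      ∀ (used : PySem.Set (Option String)) (out : List (List (String × String))),
        pvLoopA k used out pool = out ++ (pvDiv used pool).take ((k - out.length).toNat) := by
  intro n
  induction n using Nat.strong_induction_on with
  | _ n ih =>
    intro pool hn used out
    rw [pvLoopA]
    by_cases hcond : pool ≠ [] ∧ (out.length : Int) < k
    · rw [dif_pos hcond]
      cases hfu : pvFindUnseen used pool with
      | some i =>
        have hlt : i < pool.length := pvFindUnseen_lt pool used i hfu
        have hpop : PySem.List.pop? pool ((i : Nat) : Int)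
            = some (pool[i], pool.eraseIdx i) := PySem.List.pop?_natCast pool i hlt
        obtain ⟨h1, h2⟩ := pvFindUnseen_some pool used i hfu hlt
        have hdiv : pvDiv used pool
            = pool[i] :: pvDiv (PySem.Set.add used (pvGetPL pool[i])) (pool.eraseIdx i) := by
          simp [pvDiv, h1, h2]
        simp only [hfu, Option.getD_some]
        split
        next chosen pool2 heq =>
          rw [hpop] at heq
          injection heq with heq
          obtain ⟨rfl, rfl⟩ : chosen = pool[i] ∧ pool2 = pool.eraseIdx i :=
            ⟨congrArg Prod.fst heq.symm, congrArg Prod.snd heq.symm⟩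
          have hlen : (pool.eraseIdx i).length < n := by
            rw [← hn, List.length_eraseIdx_of_lt hlt]; omega
          rw [ih _ hlen (pool.eraseIdx i) rfl, hdiv]
          have harith : (k - (out.length : Int)).toNat
              = (k - ((out ++ [pool[i]]).length : Int)).toNat + 1 := by
            simp only [List.length_append, List.length_cons, List.length_nil]
            push_cast
            omega
          rw [harith, List.take_succ_cons, List.append_assoc]
          rfl
        next heq => rw [hpop] at heq; cases heq
      | none =>
        obtain ⟨p, ps, rfl⟩ : ∃ p ps, pool = p :: ps := by
          cases pool with
          | nil => exact absurd rfl hcond.1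
          | cons p ps => exact ⟨p, ps, rfl⟩
        have hfu' := hfu
        simp only [pvFindUnseen] at hfu'
        by_cases hm : pvGetPL p ∈ used
        swap
        · simp [hm] at hfu'
        simp [hm, Option.map_eq_none_iff] at hfu'
        have hadd : PySem.Set.add used (pvGetPL p) = used := PySem.Set.add_of_mem hm
        have hdiv1 : pvDiv used (p :: ps) = p :: ps := by
          have e := pvFindUnseen_none (p :: ps) used hfu
          simp [pvDiv, e]
        have hdiv2 : pvDiv used ps = ps := by
          have e := pvFindUnseen_none ps used hfu'
          simp [pvDiv, e]
        simp only [hfu, Option.getD_none]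
        split
        next chosen pool2 heq =>
          rw [show ((0 : Nat) : Int) = (0 : Int) from rfl, PySem.List.pop?_zero_cons] at heq
          injection heq with heq
          obtain ⟨rfl, rfl⟩ : chosen = p ∧ pool2 = ps :=
            ⟨congrArg Prod.fst heq.symm, congrArg Prod.snd heq.symm⟩
          have hlen : pool2.length < n := by simp at hn; omega
          rw [ih _ hlen pool2 rfl, hadd, hdiv1, hdiv2]
          have harith : (k - (out.length : Int)).toNat
              = (k - ((out ++ [chosen]).length : Int)).toNat + 1 := by
            simp only [List.length_append, List.length_cons, List.length_nil]
            push_cast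
            omega
          rw [harith, List.take_succ_cons, List.append_assoc]
          rfl
        next heq =>
          rw [show ((0 : Nat) : Int) = (0 : Int) from rfl, PySem.List.pop?_zero_cons] at heq
          cases heq
    · rw [dif_neg hcond]
      by_cases hp : pool = []
      · subst hp; simp [pvDiv, pvPart]
      · have hk : k ≤ (out.length : Int) := by
          by_contra hlt
          exact hcond ⟨hp, by omega⟩
        have hz : (k - (out.length : Int)).toNat = 0 := by omega
        simp [hz]

-- ===== VERDICT (by name: the statement is the Claim_ definition above) =====
theorem diversify_by_product_line_spec : Claim_equal_diversify_by_product_line := by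
  intro records k _
  unfold Spec_diversify_by_product_line diversify_by_product_line diversify_by_product_line_alt
  rw [pvLoopA_eq k records.length records rfl PySem.Set.empty []]
  simp only [pvDiv, List.length_nil, List.nil_append, Nat.cast_zero]
  congr 1
  omega
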